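-- pv_equiv track=rewrite | github.com/Fidget278/2022-Algorithm-Study | 개인문제/편근형/2xn 타일링 2.py | solution
-- ===== SOURCE A (Python) =====
-- def solution(n):
--   if n == 1:
--     return 1
--   elif n == 2:
--     return 3
--   else:
--     lst = [0]*(n+1)
--     lst[1], lst[2] = 1,3
--     for i in range(3, n+1):
--       lst[i] = lst[i-1] + (2*lst[i-2])
--     return lst[n] % 10007
-- ===== SOURCE B (Python) =====
-- def solution(n):
--     # closed form: f(n) = (2**(n+1) + (-1)**n) / 3, computed mod 3*10007 so the
--     # exact division by 3 survives the modular reduction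
--     t = pow(2, n + 1, 30021)                       # 30021 = 3 * 10007
--     r = (t + (1 if n % 2 == 0 else -1)) % 30021    # ≡ 3*f(n) (mod 30021)
--     return (r // 3) % 10007
-- ===== Notes on version B (the rewrite author's own statement) =====
-- stated objective: faster
-- what changed: replaces the O(n) list-building recurrence (with ever-growing big integers, reduced mod 10007 only at the end) by the closed form f(n) = (2^(n+1) + (-1)^n)/3 evaluated with modular exponentiation mod 3*10007
import Mathlib
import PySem

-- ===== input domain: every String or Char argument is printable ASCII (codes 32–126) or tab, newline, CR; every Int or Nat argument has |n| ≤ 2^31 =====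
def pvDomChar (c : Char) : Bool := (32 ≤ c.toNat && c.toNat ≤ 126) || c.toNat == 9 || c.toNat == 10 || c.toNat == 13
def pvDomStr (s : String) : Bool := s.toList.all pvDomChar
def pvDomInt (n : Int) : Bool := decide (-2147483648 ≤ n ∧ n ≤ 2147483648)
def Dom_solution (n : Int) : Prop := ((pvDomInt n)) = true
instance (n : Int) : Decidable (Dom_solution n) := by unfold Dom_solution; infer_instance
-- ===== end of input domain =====

-- B replaces A's O(n) list-building recurrence by the closed form f(n) = (2^(n+1)+(-1)^n)/3
-- evaluated with modular exponentiation mod 3*10007 (objective: faster, measured).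


-- ===== PORT A =====
-- literal transliteration of A: build lst of length n+1, seed lst[1]=1, lst[2]=3,
-- fill lst[i] = lst[i-1] + 2*lst[i-2] for i in range(3, n+1), return lst[n] % 10007
-- (pySetD/pyGetD are exact here: under Pre_ this branch has n ≥ 3, all indices in range).
def solution (n : Int) : Int :=
  if n = 1 then 1
  else if n = 2 then 3
  else
    let lst0 : List Int := List.replicate (n + 1).toNat 0
    let lst1 : List Int := PySem.List.pySetD (PySem.List.pySetD lst0 1 1) 2 3
    let lst : List Int :=
      (PySem.List.pyRange 3 (n + 1) 1).foldl
        (fun l i =>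
          PySem.List.pySetD l i (PySem.List.pyGetD l (i - 1) 0 + 2 * PySem.List.pyGetD l (i - 2) 0))
        lst1
    PySem.Int.mod (PySem.List.pyGetD lst n 0) 10007

-- ===== PORT B =====
-- literal transliteration of Source B; pow(2, n+1, 30021) ported as PySem.Int.powMod
-- (exact for the nonnegative exponents Pre_ admits).
def solution_alt (n : Int) : Int :=
  let t : Int := PySem.Int.powMod 2 (n + 1).toNat 30021
  let r : Int := PySem.Int.mod (t + (if PySem.Int.mod n 2 = 0 then 1 else -1)) 30021
  PySem.Int.mod (PySem.Int.floordiv r 3) 10007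

-- ===== PRECONDITION & SPEC =====
-- A raises IndexError (on `lst[1], lst[2] = 1, 3`) for every n ≤ 0; exactly those inputs are excluded.
def Pre_solution (n : Int) : Prop := 1 ≤ n
instance (n : Int) : Decidable (Pre_solution n) := by unfold Pre_solution; infer_instance
def pvWitness_solution : Int := 5

def Spec_solution (n : Int) (out : Int) : Prop := out = solution_alt n
instance (n : Int) (out : Int) : Decidable (Spec_solution n out) := by unfold Spec_solution; infer_instance

-- ===== CLAIM (what is proved, stated in full; the proofs are below) =====
def Claim_equal_solution : Prop := ∀ (n : Int), Dom_solution n → Pre_solution n → Spec_solution n (solution n)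

-- ===== LEMMAS AND PROOFS =====

-- the tiling recurrence both programs compute: f 0 = 1, f 1 = 1, f (k+2) = f (k+1) + 2 * f k  (f 2 = 3)
def f : Nat → Int
  | 0 => 1
  | 1 => 1
  | (k + 2) => f (k + 1) + 2 * f k

lemma f_rec (m : Nat) (hm : 1 ≤ m) : f (m + 1) = f m + 2 * f (m - 1) := by
  obtain ⟨p, rfl⟩ : ∃ p, m = p + 1 := ⟨m - 1, by omega⟩
  simp [f]

-- closed form used by B: 3 * f k = 2^(k+1) + (-1)^k
lemma f_closed (k : Nat) : 3 * f k = 2 ^ (k + 1) + (-1 : Int) ^ k := by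
  induction k using Nat.strong_induction_on with
  | _ k ih =>
    match k with
    | 0 => decide
    | 1 => decide
    | (k + 2) =>
      have h1 := ih (k + 1) (by omega)
      have h2 := ih k (by omega)
      simp only [f]
      have : (3 : Int) * (f (k + 1) + 2 * f k) = 3 * f (k + 1) + 2 * (3 * f k) := by ring
      rw [this, h1, h2]
      ring

-- A's loop body and seeded list, named for the invariant
def stepL : List Int → Int → List Int := fun l i =>
  PySem.List.pySetD l i (PySem.List.pyGetD l (i - 1) 0 + 2 * PySem.List.pyGetD l (i - 2) 0)
def initL (N : Nat) : List Int := ((List.replicate (N + 1) (0:Int)).set 1 1).set 2 3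

-- invariant of A's loop: after processing range(3, m+1) the list has length N+1 and cell j holds f j for 1 ≤ j ≤ m
lemma loop_inv (N : Nat) (hN : 3 ≤ N) (m : Nat) (hm : 2 ≤ m) (hmN : m ≤ N) :
    ((PySem.List.pyRange 3 ((m:Int) + 1) 1).foldl stepL (initL N)).length = N + 1 ∧
    ∀ j : Nat, 1 ≤ j → j ≤ m →
      ((PySem.List.pyRange 3 ((m:Int) + 1) 1).foldl stepL (initL N)).getD j 0 = f j := by
  induction m, hm using Nat.le_induction with
  | base =>
    rw [show ((2:Nat):Int) + 1 = 3 by norm_num, PySem.List.pyRange_one_eq_nil (le_refl 3)]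
    simp only [List.foldl_nil]
    refine ⟨by simp [initL], ?_⟩
    intro j h1 h2
    have h0 : 0 < N := by omega
    have h2' : 2 ≤ N := by omega
    interval_cases j <;>
      simp [initL, List.getD_eq_getElem?_getD, h0, h2', f]
  | succ m hm ih =>
    have ih := ih (by omega)
    obtain ⟨hlen, hval⟩ := ih
    have hcast : ((m + 1 : Nat) : Int) + 1 = ((m:Nat):Int) + 1 + 1 := by push_cast; ring
    rw [hcast, PySem.List.pyRange_one_succ_right (by omega : (3:Int) ≤ (m:Int) + 1), List.foldl_append]
    set L := (PySem.List.pyRange 3 ((m:Int) + 1) 1).foldl stepL (initL N) with hL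
    simp only [List.foldl_cons, List.foldl_nil]
    have e1 : ((m:Int) + 1 - 1) = ((m:Nat):Int) := by ring
    have e2 : ((m:Int) + 1 - 2) = (((m - 1 : Nat)):Int) := by omega
    have hv : stepL L ((m:Int) + 1) = L.set (m + 1) (f m + 2 * f (m - 1)) := by
      unfold stepL
      rw [e1, e2, PySem.List.pyGetD_natCast, PySem.List.pyGetD_natCast,
        hval m (by omega) (by omega), hval (m-1) (by omega) (by omega),
        show ((m:Int) + 1) = ((m + 1 : Nat) : Int) by push_cast; ring,
        PySem.List.pySetD_natCast]
    rw [hv]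
    constructor
    · simp [hlen]
    · intro j h1 h2
      have hjlen : j < L.length := by omega
      by_cases hj : j = m + 1
      · subst hj
        rw [List.getD_eq_getElem _ _ (by simp [hlen]; omega)]
        rw [List.getElem_set_self]
        exact (f_rec m (by omega)).symm
      · rw [List.getD_eq_getElem _ _ (by simp [hlen]; omega)]
        rw [List.getElem_set_ne (by omega)]
        rw [← List.getD_eq_getElem _ _ hjlen]
        exact hval j h1 (by omega)

-- A computes f n % 10007 for every n ≥ 1
lemma a_eq (n : Int) (hn : 1 ≤ n) : solution n = f n.toNat % 10007 := by
  obtain ⟨k, rfl⟩ : ∃ k : Nat, n = (k : Int) := ⟨n.toNat, by omega⟩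
  have hk : 1 ≤ k := by omega
  rw [Int.toNat_natCast]
  match k, hk with
  | 1, _ => simp [solution, f]
  | 2, _ => simp [solution]; decide
  | (p + 3), _ =>
    set N := p + 3 with hNdef
    have hN : 3 ≤ N := by omega
    simp only [solution]
    rw [if_neg (by omega), if_neg (by omega)]
    have hinit : PySem.List.pySetD (PySem.List.pySetD (List.replicate ((N:Int) + 1).toNat (0:Int)) 1 1) 2 3 = initL N := by
      rw [show ((N:Int) + 1).toNat = N + 1 by omega]
      simp [PySem.List.pySetD_of_nonneg, initL]
    simp only [hinit]
    have hstep : (fun (l : List Int) (i : Int) =>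
        PySem.List.pySetD l i (PySem.List.pyGetD l (i - 1) 0 + 2 * PySem.List.pyGetD l (i - 2) 0)) = stepL := rfl
    rw [hstep]
    obtain ⟨hlen, hval⟩ := loop_inv N hN N (by omega) (le_refl N)
    rw [PySem.List.pyGetD_natCast, hval N (by omega) (le_refl N),
      PySem.Int.mod_eq_emod_of_pos (by norm_num : (0:Int) < 10007)]

-- B computes f k % 10007 for every natural k
lemma alt_eq_nat (k : Nat) : solution_alt (k : Int) = f k % 10007 := by
  have h1 : ((k : Int) + 1).toNat = k + 1 := by omega
  simp only [solution_alt, PySem.Int.powMod, h1]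
  rw [PySem.Int.mod_eq_emod_of_pos (by norm_num : (0:Int) < 30021)]
  rw [PySem.Int.mod_eq_emod_of_pos (by norm_num : (0:Int) < 30021)]
  rw [PySem.Int.mod_eq_emod_of_pos (by norm_num : (0:Int) < 10007)]
  have hsign : (if PySem.Int.mod (k : Int) 2 = 0 then (1:Int) else -1) = (-1)^k := by
    have hk2 : PySem.Int.mod (k:Int) 2 = ((k % 2 : Nat) : Int) := PySem.Int.mod_natCast k 2
    rcases Nat.even_or_odd k with he | ho
    · rw [if_pos (by rw [hk2]; simp [Nat.even_iff.mp he]), he.neg_one_pow]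
    · rw [if_neg (by rw [hk2]; simp [Nat.odd_iff.mp ho]), ho.neg_one_pow]
  rw [hsign]
  have hr : ((2:Int) ^ (k+1) % 30021 + (-1)^k) % 30021 = (3 * f k) % 30021 := by
    rw [Int.add_emod, Int.emod_emod_of_dvd _ (by norm_num)]
    rw [← Int.add_emod, f_closed]
  rw [hr]
  rw [show (30021 : Int) = 3 * 10007 by norm_num, Int.mul_emod_mul_of_pos _ _ (by norm_num)]
  rw [PySem.Int.floordiv_eq_ediv_of_pos (by norm_num)]
  rw [Int.mul_ediv_cancel_left _ (by norm_num)]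
  rw [Int.emod_emod_of_dvd _ (by norm_num)]

lemma alt_eq (n : Int) (hn : 1 ≤ n) : solution_alt n = f n.toNat % 10007 := by
  obtain ⟨k, rfl⟩ : ∃ k : Nat, n = (k : Int) := ⟨n.toNat, by omega⟩
  rw [Int.toNat_natCast]
  exact alt_eq_nat k

-- ===== VERDICT (by name: the statement is the Claim_ definition above) =====
theorem solution_spec : Claim_equal_solution := by
  intro n _ hpre
  unfold Spec_solution
  rw [a_eq n hpre, alt_eq n hpre]
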